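-- pv_equiv track=rewrite | github.com/BeATz-UnKNoWN/ncss_challenge_2017_advanced | wk2/light_up,board_state.py | board_is_solved
-- ===== SOURCE A (Python) =====
-- def board_is_solved(board):
--   n = len(board)
--   for row in range(n):
--     for col in range(n):
--       #touching bulbs check
--       if board[row][col].isdigit():
--         count = 0
--         if row < n-1 and board[row+1][col] == 'L': count += 1
--         if row > 0 and board[row-1][col] == 'L': count += 1
--         if col < n-1 and board[row][col+1] == 'L': count += 1
--         if col > 0 and board[row][col-1] == 'L': count += 1
--         if count != int(board[row][col]): return False
--       #all lit check
--       elif board[row][col] == '.':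
--         isLit = False
--         x,y = row,col
--         while x < n-1 and (board[x][y] == '.' or board[x][y]=='L') and not isLit:
--           x+=1
--           if board[x][y] == 'L': isLit = True
--         x,y = row,col
--         while x > 0 and (board[x][y] == '.' or board[x][y]=='L') and not isLit:
--           x-=1
--           if board[x][y] == 'L': isLit = True
--         x,y = row,col
--         while y < n-1 and (board[x][y] == '.' or board[x][y]=='L') and not isLit:
--           y+=1
--           if board[x][y] == 'L': isLit = True
--         x,y = row,col
--         while y > 0 and (board[x][y] == '.' or board[x][y]=='L') and not isLit:
--           y-=1;
--           if board[x][y] == 'L': isLit = True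
--         if not isLit: return False
--   return True  # TODO
-- ===== SOURCE B (Python) =====
-- def board_is_solved(board):
--     n = len(board)
--     grid = [row[:n] for row in board]
--
--     def line_lit(cells):
--         # forward pass: bulb visible from the left (or the cell itself is a bulb)
--         fwd = []
--         seen = False
--         for c in cells:
--             if c == 'L':
--                 seen = True
--             elif c != '.':
--                 seen = False
--             fwd.append(seen)
--         # backward pass: bulb visible from the right
--         bwd = []
--         seen = False
--         for c in reversed(cells):
--             if c == 'L':
--                 seen = True
--             elif c != '.':
--                 seen = False
--             bwd.append(seen)
--         bwd.reverse()
--         return [a or b for a, b in zip(fwd, bwd)]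
--
--     row_lit = [line_lit(r) for r in grid]
--     col_lit = [line_lit([grid[x][y] for x in range(n)]) for y in range(n)]
--
--     for row in range(n):
--         for col in range(n):
--             cell = grid[row][col]
--             if cell.isdigit():
--                 count = 0
--                 if row < n - 1 and grid[row + 1][col] == 'L': count += 1
--                 if row > 0 and grid[row - 1][col] == 'L': count += 1
--                 if col < n - 1 and grid[row][col + 1] == 'L': count += 1
--                 if col > 0 and grid[row][col - 1] == 'L': count += 1
--                 if count != int(cell):
--                     return False
--             elif cell == '.':
--                 if not (row_lit[row][col] or col_lit[col][row]):
--                     return False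
--     return True
-- ===== Notes on version B (the rewrite author's own statement) =====
-- stated objective: alternative
-- what changed: A re-scans up to four rays from every '.' cell to decide whether it is lit; B instead precomputes lit cells with one forward and one backward segment sweep per row and per column and then checks each cell against those tables (worst-case asymptotically better, but not faster on the generated inputs, where A's early exits win).
-- outside the precondition, e.g. on board_is_solved([['5', 'x'], ['.']]): A returns False, B raises IndexError
import Mathlib
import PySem

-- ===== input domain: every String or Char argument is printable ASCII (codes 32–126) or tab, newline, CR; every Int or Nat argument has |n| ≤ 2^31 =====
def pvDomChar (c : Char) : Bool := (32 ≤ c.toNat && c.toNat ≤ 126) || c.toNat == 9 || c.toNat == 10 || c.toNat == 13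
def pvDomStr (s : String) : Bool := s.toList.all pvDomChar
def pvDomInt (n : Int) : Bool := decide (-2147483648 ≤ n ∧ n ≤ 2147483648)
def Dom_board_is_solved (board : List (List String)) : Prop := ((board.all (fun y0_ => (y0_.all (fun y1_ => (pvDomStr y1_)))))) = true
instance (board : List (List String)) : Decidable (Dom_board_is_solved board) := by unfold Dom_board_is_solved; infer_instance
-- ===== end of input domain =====

-- B replaces A's per-cell ray scans by one forward and one backward lit-sweep per row
-- and per column, checking cells against the precomputed tables; proved equal on square boards.

-- ===== PORT A =====
-- board[r][c]; inside Pre_ both indices are always in range, so getD is exact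
def pvGetCell (b : List (List String)) (r c : Nat) : String := (b.getD r []).getD c ""

-- board[x][y] == '.' or board[x][y] == 'L'
def pvPass (s : String) : Bool := s == "." || s == "L"

-- A's two increasing while loops (down / right) over a line accessor `get`
-- (column: get x = board[x][col]; row: get y = board[row][y]); fuel n bounds the ≤ n-1 steps
def scanIncAux (get : Nat → String) (n : Nat) : Nat → Nat → Bool → Bool
  | 0, _, isLit => isLit
  | fuel+1, x, isLit =>
    if x < n - 1 && pvPass (get x) && !isLit then
      scanIncAux get n fuel (x+1) (if get (x+1) == "L" then true else isLit)
    else isLit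

-- A's two decreasing while loops (up / left); the position itself decreases
def scanDecAux (get : Nat → String) : Nat → Bool → Bool
  | 0, isLit => isLit
  | x+1, isLit =>
    if pvPass (get (x+1)) && !isLit then
      scanDecAux get x (if get x == "L" then true else isLit)
    else isLit

-- the body of A's double loop for one cell (True = no `return False` from this cell)
def cellOK (board : List (List String)) (n row col : Nat) : Bool :=
  let cell := pvGetCell board row col
  if PySem.Str.strIsdigit cell then
    let count : Int :=
      (if row < n - 1 && pvGetCell board (row+1) col == "L" then 1 else 0) +
      (if 0 < row && pvGetCell board (row-1) col == "L" then 1 else 0) +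
      (if col < n - 1 && pvGetCell board row (col+1) == "L" then 1 else 0) +
      (if 0 < col && pvGetCell board row (col-1) == "L" then 1 else 0)
    count == (PySem.Int.ofStr? cell).getD 0
  else if cell == "." then
    -- the four scans threaded through isLit, in A's order: down, up, right, left
    let isLit := scanIncAux (fun x => pvGetCell board x col) n n row false
    let isLit := scanDecAux (fun x => pvGetCell board x col) row isLit
    let isLit := scanIncAux (fun y => pvGetCell board row y) n n col isLit
    let isLit := scanDecAux (fun y => pvGetCell board row y) col isLit
    isLit
  else true

def board_is_solved (board : List (List String)) : Bool :=
  let n := board.length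
  (List.range n).all fun row => (List.range n).all fun col => cellOK board n row col

-- ===== PORT B =====
-- one sweep step: a bulb lights, a '.' keeps the carried state, anything else blocks
def pvStep (seen : Bool) (c : String) : Bool :=
  if c == "L" then true else if c == "." then seen else false

-- Source B's forward pass: the list of `seen` values
def sweepFwd : Bool → List String → List Bool
  | _, [] => []
  | seen, c :: rest =>
    let s := pvStep seen c
    s :: sweepFwd s rest

-- Source B's line_lit: forward pass, backward pass (= forward pass over the reversed
-- line, reversed back), joined with `or`
def lineLit (cells : List String) : List Bool :=
  List.zipWith (fun a b => a || b) (sweepFwd false cells)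
    ((sweepFwd false cells.reverse).reverse)

def board_is_solved_alt (board : List (List String)) : Bool :=
  let n := board.length
  let grid := board.map (fun row => row.take n)   -- row[:n]
  let rowLit := grid.map lineLit
  let colLit := (List.range n).map fun y => lineLit ((List.range n).map fun x => pvGetCell grid x y)
  (List.range n).all fun row => (List.range n).all fun col =>
    let cell := pvGetCell grid row col
    if PySem.Str.strIsdigit cell then
      let count : Int :=
        (if row < n - 1 && pvGetCell grid (row+1) col == "L" then 1 else 0) +
        (if 0 < row && pvGetCell grid (row-1) col == "L" then 1 else 0) +
        (if col < n - 1 && pvGetCell grid row (col+1) == "L" then 1 else 0) +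
        (if 0 < col && pvGetCell grid row (col-1) == "L" then 1 else 0)
      count == (PySem.Int.ofStr? cell).getD 0
    else if cell == "." then
      (rowLit.getD row []).getD col false || (colLit.getD col []).getD row false
    else true

-- ===== PRECONDITION & SPEC =====
-- Pre_ excludes ragged boards (some row shorter than the number of rows): there A's cell
-- accesses raise IndexError, and when A does return a value it is only because its lazy
-- cell-by-cell scan happens not to reach the short row — an accident of scan order;
-- B precomputes whole rows and columns and raises there.
def Pre_board_is_solved (board : List (List String)) : Prop :=
  ∀ row ∈ board, board.length ≤ row.length
instance (board : List (List String)) : Decidable (Pre_board_is_solved board) := by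
  unfold Pre_board_is_solved; infer_instance

def pvWitness_board_is_solved : List (List String) := [[".", "L"], ["L", "1"]]

def Spec_board_is_solved (board : List (List String)) (out : Bool) : Prop := out = board_is_solved_alt board
instance (board : List (List String)) (out : Bool) : Decidable (Spec_board_is_solved board out) := by unfold Spec_board_is_solved; infer_instance

-- ===== CLAIM (what is proved, stated in full; the proofs are below) =====
def Claim_equal_board_is_solved : Prop := ∀ (board : List (List String)), Dom_board_is_solved board → Pre_board_is_solved board → Spec_board_is_solved board (board_is_solved board)

-- ===== LEMMAS AND PROOFS =====

-- visibility of a bulb strictly below index i (through passable cells), recursively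
def visDec (get : Nat → String) : Nat → Bool
  | 0 => false
  | i+1 => pvPass (get (i+1)) && ((get i == "L") || visDec get i)

-- visibility of a bulb strictly above index x (below n), recursively
def visInc (get : Nat → String) (n : Nat) (x : Nat) : Bool :=
  if x < n - 1 then
    pvPass (get x) && ((get (x+1) == "L") || visInc get n (x+1))
  else false
termination_by n - 1 - x
decreasing_by omega

theorem scanIncAux_true (get : Nat → String) (n fuel x : Nat) :
    scanIncAux get n fuel x true = true := by
  cases fuel <;> simp [scanIncAux]

theorem scanDecAux_true (get : Nat → String) (x : Nat) :
    scanDecAux get x true = true := by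
  cases x <;> simp [scanDecAux]

theorem scanIncAux_eq_visInc (get : Nat → String) (n : Nat) :
    ∀ fuel x, n ≤ fuel + x + 1 → scanIncAux get n fuel x false = visInc get n x := by
  intro fuel
  induction fuel with
  | zero =>
    intro x hx
    rw [visInc, scanIncAux]
    have : ¬ x < n - 1 := by omega
    simp [this]
  | succ fuel ih =>
    intro x hx
    rw [visInc, scanIncAux]
    by_cases h1 : x < n - 1
    · by_cases h2 : pvPass (get x) = true
      · by_cases h3 : get (x+1) == "L"
        · simp [h1, h2, h3, scanIncAux_true]
        · simp only [h1, h2, h3]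
          simp only [decide_true, Bool.true_and, Bool.and_true, Bool.not_false, if_true,
            Bool.false_or]
          exact ih (x+1) (by omega)
      · simp [h1, h2]
    · simp [h1]

theorem scanDecAux_eq_visDec (get : Nat → String) :
    ∀ x, scanDecAux get x false = visDec get x := by
  intro x
  induction x with
  | zero => simp [scanDecAux, visDec]
  | succ x ih =>
    rw [scanDecAux, visDec]
    by_cases h2 : pvPass (get (x+1)) = true
    · by_cases h3 : get x == "L"
      · simp [h2, h3, scanDecAux_true]
      · simp only [h2, h3]
        simp only [Bool.not_false, Bool.and_true, if_true, Bool.false_or]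
        exact ih
    · simp [h2]

theorem visDec_congr (get get' : Nat → String) :
    ∀ i, (∀ j, j ≤ i → get j = get' j) → visDec get i = visDec get' i := by
  intro i
  induction i with
  | zero => intro _; simp [visDec]
  | succ i ih =>
    intro h
    rw [visDec, visDec, h (i+1) (by omega), h i (by omega), ih (fun j hj => h j (by omega))]

theorem visInc_unfold (get : Nat → String) (n x : Nat) :
    visInc get n x =
      if x < n - 1 then pvPass (get x) && ((get (x+1) == "L") || visInc get n (x+1))
      else false := by
  conv_lhs => rw [visInc]

theorem visInc_congr (get get' : Nat → String) (n : Nat) (h : ∀ j, j < n → get j = get' j) :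
    ∀ x, visInc get n x = visInc get' n x := by
  have key : ∀ fuel x, n - 1 - x ≤ fuel → visInc get n x = visInc get' n x := by
    intro fuel
    induction fuel with
    | zero =>
      intro x hx
      rw [visInc_unfold get, visInc_unfold get']
      have : ¬ x < n - 1 := by omega
      simp [this]
    | succ fuel ih =>
      intro x hx
      rw [visInc_unfold get, visInc_unfold get']
      by_cases h1 : x < n - 1
      · rw [h x (by omega), h (x+1) (by omega), ih (x+1) (by omega)]
      · simp [h1]
  intro x
  exact key (n - 1 - x) x (le_refl _)

-- A's threaded four scans as a disjunction of the four visibilities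
theorem alit_eq (board : List (List String)) (n row col : Nat) :
    (scanDecAux (fun y => pvGetCell board row y) col
      (scanIncAux (fun y => pvGetCell board row y) n n col
        (scanDecAux (fun x => pvGetCell board x col) row
          (scanIncAux (fun x => pvGetCell board x col) n n row false)))) =
    ((visInc (fun x => pvGetCell board x col) n row || visDec (fun x => pvGetCell board x col) row) ||
     (visInc (fun y => pvGetCell board row y) n col || visDec (fun y => pvGetCell board row y) col)) := by
  rw [scanIncAux_eq_visInc _ _ _ _ (by omega)]
  cases h1 : visInc (fun x => pvGetCell board x col) n row
  · rw [scanDecAux_eq_visDec]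
    cases h2 : visDec (fun x => pvGetCell board x col) row
    · rw [scanIncAux_eq_visInc _ _ _ _ (by omega)]
      cases h3 : visInc (fun y => pvGetCell board row y) n col
      · rw [scanDecAux_eq_visDec]; simp
      · rw [scanDecAux_true]; simp
    · rw [scanIncAux_true, scanDecAux_true]; simp
  · rw [scanDecAux_true, scanIncAux_true, scanDecAux_true]; simp

theorem length_sweepFwd (s : Bool) (L : List String) : (sweepFwd s L).length = L.length := by
  induction L generalizing s with
  | nil => simp [sweepFwd]
  | cons c rest ih => simp [sweepFwd, ih]

theorem sweepFwd_getD_zero (s : Bool) (L : List String) (h : L ≠ []) :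
    (sweepFwd s L).getD 0 false = pvStep s (L.getD 0 "") := by
  cases L with
  | nil => simp at h
  | cons c rest => simp [sweepFwd]

theorem sweepFwd_getD_succ (L : List String) :
    ∀ s i, i + 1 < L.length →
      (sweepFwd s L).getD (i+1) false = pvStep ((sweepFwd s L).getD i false) (L.getD (i+1) "") := by
  induction L with
  | nil => intro s i h; simp at h
  | cons c rest ih =>
    intro s i h
    cases i with
    | zero =>
      have hrest : rest ≠ [] := by
        intro hnil
        rw [hnil] at h
        simp at h
      simp only [sweepFwd, List.getD_cons_succ, List.getD_cons_zero]
      exact sweepFwd_getD_zero _ _ hrest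
    | succ i =>
      simp only [sweepFwd, List.getD_cons_succ]
      exact ih (pvStep s c) i (by simpa using h)

theorem pass_and_visDec (get : Nat → String) (i : Nat) :
    (pvPass (get i) && visDec get i) = visDec get i := by
  cases i with
  | zero => simp [visDec]
  | succ i =>
    rw [visDec]
    cases pvPass (get (i+1)) <;> simp

theorem fwd_spec (L : List String) :
    ∀ i, i < L.length →
      (sweepFwd false L).getD i false =
        ((L.getD i "" == "L") || (pvPass (L.getD i "") && visDec (fun j => L.getD j "") i)) := by
  intro i
  induction i with
  | zero =>
    intro h
    have hL : L ≠ [] := by intro hnil; rw [hnil] at h; simp at h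
    rw [sweepFwd_getD_zero _ _ hL]
    simp only [visDec]
    set c := L.getD 0 "" with hc
    by_cases h1 : c = "L"
    · simp [pvStep, pvPass, h1]
    · by_cases h2 : c = "."
      · simp [pvStep, pvPass, h2]
      · simp [pvStep, pvPass, h1, h2]
  | succ i ih =>
    intro h
    rw [sweepFwd_getD_succ _ _ _ h, ih (by omega)]
    rw [visDec]
    set c := L.getD (i+1) "" with hc
    set b := L.getD i "" with hb
    set v := visDec (fun j => L.getD j "") i with hv
    have habs : (pvPass b && v) = v := pass_and_visDec (fun j => L.getD j "") i
    simp only [pvPass] at habs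
    by_cases h1 : c = "L"
    · simp [pvStep, pvPass, h1]
    · by_cases h2 : c = "."
      · simp only [pvStep, pvPass, h2]
        cases h3 : (b == "L")
        · cases hvv : v
          · simp
          · rw [h3, hvv] at habs
            simp at habs
            simp [habs]
        · simp
      · simp [pvStep, pvPass, h1, h2]

theorem getD_reverse {α : Type} (M : List α) (i : Nat) (d : α) (h : i < M.length) :
    M.reverse.getD i d = M.getD (M.length - 1 - i) d := by
  rw [List.getD_eq_getElem _ _ (by simpa using h), List.getD_eq_getElem _ _ (by omega),
    List.getElem_reverse]

theorem visDec_rev (L : List String) :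
    ∀ m i, i < L.length → m = L.length - 1 - i →
      visDec (fun j => L.getD (L.length - 1 - j) "") m = visInc (fun j => L.getD j "") L.length i := by
  intro m
  induction m with
  | zero =>
    intro i hi hm
    rw [visDec, visInc]
    have : ¬ i < L.length - 1 := by omega
    simp [this]
  | succ m ih =>
    intro i hi hm
    rw [visDec, visInc]
    have h1 : L.length - 1 - (m+1) = i := by omega
    have h2 : L.length - 1 - m = i + 1 := by omega
    have h3 : i < L.length - 1 := by omega
    rw [h1, h2, ih (i+1) (by omega) (by omega)]
    simp [h3]

theorem bwd_spec (L : List String) (i : Nat) (h : i < L.length) :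
    ((sweepFwd false L.reverse).reverse).getD i false =
      ((L.getD i "" == "L") || (pvPass (L.getD i "") && visInc (fun j => L.getD j "") L.length i)) := by
  have hlen : (sweepFwd false L.reverse).length = L.length := by
    rw [length_sweepFwd, List.length_reverse]
  rw [getD_reverse _ _ _ (by rw [hlen]; omega), hlen]
  rw [fwd_spec _ _ (by simp; omega)]
  have hrev : ∀ j, j < L.length → L.reverse.getD j "" = L.getD (L.length - 1 - j) "" := by
    intro j hj
    exact getD_reverse _ _ _ (by simpa using hj)
  rw [hrev _ (by omega)]

  have hi : L.length - 1 - (L.length - 1 - i) = i := by omega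
  rw [hi]
  congr 2
  rw [visDec_congr (fun j => L.reverse.getD j "") (fun j => L.getD (L.length - 1 - j) "")
    _ (fun j hj => hrev j (by omega))]
  exact visDec_rev L _ i h rfl

theorem getD_map {α β : Type} (f : α → β) (l : List α) (i : Nat) (d : β) (d' : α)
    (h : i < l.length) : (l.map f).getD i d = f (l.getD i d') := by
  rw [List.getD_eq_getElem _ _ (by simpa using h), List.getD_eq_getElem _ _ h, List.getElem_map]

theorem getD_range_map {β : Type} (f : Nat → β) (n i : Nat) (d : β) (h : i < n) :
    (((List.range n).map f).getD i d) = f i := by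
  rw [getD_map f _ i d 0 (by simpa using h)]
  congr 1
  rw [List.getD_eq_getElem _ _ (by simpa using h), List.getElem_range]

theorem getD_take {α : Type} (l : List α) (n i : Nat) (d : α) (h : i < n) :
    (l.take n).getD i d = l.getD i d := by
  by_cases hl : i < l.length
  · rw [List.getD_eq_getElem _ _ (by simp; omega), List.getD_eq_getElem _ _ hl,
      List.getElem_take]
  · rw [List.getD_eq_default _ _ (by simp; omega), List.getD_eq_default _ _ (by omega)]

theorem lineLit_getD (L : List String) (i : Nat) (h : i < L.length) :
    (lineLit L).getD i false =
      ((sweepFwd false L).getD i false || ((sweepFwd false L.reverse).reverse).getD i false) := by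
  have h1 : i < (sweepFwd false L).length := by rw [length_sweepFwd]; exact h
  have h2 : i < ((sweepFwd false L.reverse).reverse).length := by
    simp [length_sweepFwd]; omega
  have h3 : i < (lineLit L).length := by
    simp [lineLit, length_sweepFwd]; omega
  rw [List.getD_eq_getElem _ _ h3, List.getD_eq_getElem _ _ h1, List.getD_eq_getElem _ _ h2]
  simp only [lineLit, List.getElem_zipWith]

theorem all_congr' {α : Type} (l : List α) (f g : α → Bool) (h : ∀ x ∈ l, f x = g x) :
    l.all f = l.all g := by
  induction l with
  | nil => rfl
  | cons a l ih =>
    simp only [List.all_cons, h a (by simp)]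
    rw [ih (fun x hx => h x (by simp [hx]))]

-- grid cells agree with board cells at in-range columns
theorem gridCell (board : List (List String)) (r c : Nat) (hc : c < board.length) :
    pvGetCell (board.map fun row => row.take board.length) r c = pvGetCell board r c := by
  unfold pvGetCell
  by_cases hr : r < board.length
  · rw [getD_map _ _ _ _ [] hr, getD_take _ _ _ _ hc]
  · rw [show (board.map fun row => row.take board.length).getD r [] = [] from
      List.getD_eq_default _ _ (by simp; omega),
      show board.getD r [] = [] from List.getD_eq_default _ _ (by omega)]

-- the whole '.'-cell value of B, reduced to the four visibilities over board accessors
theorem blit_eq (board : List (List String)) (row col : Nat)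
    (hpre : Pre_board_is_solved board)
    (hr : row < board.length) (hc : col < board.length)
    (hcell : pvGetCell board row col = ".") :
    ((((board.map fun r => r.take board.length).map lineLit).getD row []).getD col false ||
      (((List.range board.length).map fun y =>
          lineLit ((List.range board.length).map fun x =>
            pvGetCell (board.map fun r => r.take board.length) x y)).getD col []).getD row false) =
    ((visInc (fun x => pvGetCell board x col) board.length row || visDec (fun x => pvGetCell board x col) row) ||
     (visInc (fun y => pvGetCell board row y) board.length col || visDec (fun y => pvGetCell board row y) col)) := by
  set n := board.length with hn
  -- row part
  have hrowlen : ((board.getD row []).take n).length = n := by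
    have hmem : board.getD row [] ∈ board := by
      rw [List.getD_eq_getElem _ _ hr]
      exact List.getElem_mem hr
    have := hpre (board.getD row []) hmem
    rw [List.length_take]
    omega
  have hRget : ∀ j, j < n → ((board.getD row []).take n).getD j "" = pvGetCell board row j := by
    intro j hj
    rw [getD_take _ _ _ _ hj]
    rfl
  have hrowVal : (((board.map fun r => r.take n).map lineLit).getD row []).getD col false =
      (visDec (fun y => pvGetCell board row y) col || visInc (fun y => pvGetCell board row y) n col) := by
    rw [getD_map lineLit _ _ _ [] (by simpa using hr), getD_map _ _ _ _ [] hr]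
    set R := (board.getD row []).take n with hR
    have hcell' : R.getD col "" = "." := by rw [hRget col hc]; exact hcell
    rw [lineLit_getD R col (by rw [hrowlen]; exact hc)]
    rw [fwd_spec R col (by rw [hrowlen]; exact hc), bwd_spec R col (by rw [hrowlen]; exact hc)]
    rw [hcell']
    rw [visDec_congr (fun j => R.getD j "") (fun y => pvGetCell board row y) col
      (fun j hj => hRget j (by omega))]
    rw [visInc_congr (fun j => R.getD j "") (fun y => pvGetCell board row y) R.length
      (fun j hj => hRget j (by rw [hrowlen] at hj; exact hj))]
    rw [hrowlen]
    simp [pvPass]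
  -- column part
  have hCget : ∀ j, j < n →
      (((List.range n).map fun x => pvGetCell (board.map fun r => r.take n) x col)).getD j "" =
        pvGetCell board j col := by
    intro j hj
    rw [getD_range_map _ _ _ _ hj, gridCell board j col hc]
  have hClen : (((List.range n).map fun x => pvGetCell (board.map fun r => r.take n) x col)).length = n := by
    simp
  have hcolVal : (((List.range n).map fun y =>
        lineLit ((List.range n).map fun x => pvGetCell (board.map fun r => r.take n) x y)).getD col []).getD row false =
      (visDec (fun x => pvGetCell board x col) row || visInc (fun x => pvGetCell board x col) n row) := by
    rw [getD_range_map _ _ _ _ hc]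
    set C := ((List.range n).map fun x => pvGetCell (board.map fun r => r.take n) x col) with hC
    have hcell' : C.getD row "" = "." := by rw [hCget row hr]; exact hcell
    rw [lineLit_getD C row (by rw [hClen]; exact hr)]
    rw [fwd_spec C row (by rw [hClen]; exact hr), bwd_spec C row (by rw [hClen]; exact hr)]
    rw [hcell']
    rw [visDec_congr (fun j => C.getD j "") (fun x => pvGetCell board x col) row
      (fun j hj => hCget j (by omega))]
    rw [visInc_congr (fun j => C.getD j "") (fun x => pvGetCell board x col) C.length
      (fun j hj => hCget j (by rw [hClen] at hj; exact hj))]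
    rw [hClen]
    simp [pvPass]
  rw [hrowVal, hcolVal]
  cases visInc (fun x => pvGetCell board x col) n row <;>
    cases visDec (fun x => pvGetCell board x col) row <;>
    cases visInc (fun y => pvGetCell board row y) n col <;>
    cases visDec (fun y => pvGetCell board row y) col <;> rfl

-- ===== VERDICT (by name: the statement is the Claim_ definition above) =====
theorem board_is_solved_spec : Claim_equal_board_is_solved := by
  intro board _ hpre
  unfold Spec_board_is_solved board_is_solved board_is_solved_alt
  simp only []
  apply all_congr'
  intro row hrow
  apply all_congr'
  intro col hcol
  rw [List.mem_range] at hrow hcol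
  have hcellEq := gridCell board row col hcol
  unfold cellOK
  rw [hcellEq]
  by_cases hd : PySem.Str.strIsdigit (pvGetCell board row col) = true
  · simp only [hd, if_true]
    rw [gridCell board (row+1) col hcol, gridCell board (row-1) col hcol,
      gridCell board row (col-1) (by omega)]
    by_cases b3 : col < board.length - 1
    · rw [gridCell board row (col+1) (by omega)]
    · simp [b3]
  · simp only [hd]
    by_cases hc : (pvGetCell board row col == ".") = true
    · simp only [hc, if_true]
      rw [alit_eq board board.length row col]
      rw [blit_eq board row col hpre hrow hcol (by simpa using hc)]
      simp
    · simp [hc]
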